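-- pv_equiv track=rewrite | github.com/wjdsilver/CodeTree | 251020/기울어진 직사각형의 회전/rotate-slanted-rectangle.py | get_diamond_path
-- ===== SOURCE A (Python) =====
-- def get_diamond_path(r, c, m1, m2, m3, m4):
--     path = []
--     x, y = r, c
--
--     for _ in range(m1):
--         path.append((x, y))
--         x, y = x - 1, y + 1
--
--     for _ in range(m2):
--         path.append((x, y))
--         x, y = x - 1, y - 1
--
--     for _ in range(m3):
--         path.append((x, y))
--         x, y = x + 1, y - 1
--
--     for _ in range(m4):
--         path.append((x, y))
--         x, y = x + 1, y + 1
--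
--     return path
-- ===== SOURCE B (Python) =====
-- def get_diamond_path(r, c, m1, m2, m3, m4):
--     # effective segment lengths (range(m) is empty for negative m)
--     m1, m2, m3, m4 = max(m1, 0), max(m2, 0), max(m3, 0), max(m4, 0)
--     corners = [(r, c),
--                (r - m1, c + m1),
--                (r - m1 - m2, c + m1 - m2),
--                (r - m1 - m2 + m3, c + m1 - m2 - m3)]
--     steps = [(-1, 1), (-1, -1), (1, -1), (1, 1)]
--     lens = [m1, m2, m3, m4]
--     return [(cx + dx * i, cy + dy * i)
--             for (cx, cy), (dx, dy), m in zip(corners, steps, lens)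
--             for i in range(m)]
-- ===== Notes on version B (the rewrite author's own statement) =====
-- stated objective: alternative
-- what changed: B precomputes the four corner starting points in closed form and emits each segment independently as (corner + step*i) over its index range, instead of threading a running (x, y) accumulator through four sequential loops.
import Mathlib
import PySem

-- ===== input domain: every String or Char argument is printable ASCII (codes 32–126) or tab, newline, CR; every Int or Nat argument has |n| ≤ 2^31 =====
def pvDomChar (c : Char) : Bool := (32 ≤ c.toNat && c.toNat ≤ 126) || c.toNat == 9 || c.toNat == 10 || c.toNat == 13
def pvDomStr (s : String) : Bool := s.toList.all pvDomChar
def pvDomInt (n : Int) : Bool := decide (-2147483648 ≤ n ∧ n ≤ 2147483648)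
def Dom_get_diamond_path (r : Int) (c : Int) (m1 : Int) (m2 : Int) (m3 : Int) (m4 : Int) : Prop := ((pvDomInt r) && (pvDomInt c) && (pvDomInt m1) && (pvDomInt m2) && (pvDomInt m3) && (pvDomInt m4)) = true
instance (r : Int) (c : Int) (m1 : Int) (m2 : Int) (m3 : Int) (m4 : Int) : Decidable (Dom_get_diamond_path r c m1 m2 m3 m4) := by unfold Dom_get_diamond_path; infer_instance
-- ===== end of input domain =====

-- B replaces A's threaded (x,y) accumulator by closed-form corners plus per-segment index arithmetic (alternative decomposition, same cost).

-- ===== PORT A =====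
-- one 'for _ in range(m)' loop of A: appends (x,y) then steps by (dx,dy); returns (appended points, final x, final y)
def pvSegA (x y dx dy : Int) : Nat → List (Int × Int) × Int × Int
  | 0 => ([], x, y)
  | n + 1 =>
    let rest := pvSegA (x + dx) (y + dy) dx dy n
    ((x, y) :: rest.1, rest.2)

def get_diamond_path (r : Int) (c : Int) (m1 : Int) (m2 : Int) (m3 : Int) (m4 : Int) : List (Int × Int) :=
  let s1 := pvSegA r c (-1) 1 m1.toNat
  let s2 := pvSegA s1.2.1 s1.2.2 (-1) (-1) m2.toNat
  let s3 := pvSegA s2.2.1 s2.2.2 1 (-1) m3.toNat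
  let s4 := pvSegA s3.2.1 s3.2.2 1 1 m4.toNat
  s1.1 ++ s2.1 ++ s3.1 ++ s4.1

-- ===== PORT B =====
-- one segment of B: all points derived directly from the segment's corner and the loop index
def pvSegB (cx cy dx dy m : Int) : List (Int × Int) :=
  (List.range m.toNat).map (fun (i : Nat) => (cx + dx * (i : Int), cy + dy * (i : Int)))

def get_diamond_path_alt (r : Int) (c : Int) (m1 : Int) (m2 : Int) (m3 : Int) (m4 : Int) : List (Int × Int) :=
  let n1 := max m1 0
  let n2 := max m2 0
  let n3 := max m3 0
  let n4 := max m4 0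
  pvSegB r c (-1) 1 n1 ++
  pvSegB (r - n1) (c + n1) (-1) (-1) n2 ++
  pvSegB (r - n1 - n2) (c + n1 - n2) 1 (-1) n3 ++
  pvSegB (r - n1 - n2 + n3) (c + n1 - n2 - n3) 1 1 n4

-- ===== PRECONDITION & SPEC =====
def Spec_get_diamond_path (r : Int) (c : Int) (m1 : Int) (m2 : Int) (m3 : Int) (m4 : Int) (out : List (Int × Int)) : Prop := out = get_diamond_path_alt r c m1 m2 m3 m4
instance (r : Int) (c : Int) (m1 : Int) (m2 : Int) (m3 : Int) (m4 : Int) (out : List (Int × Int)) : Decidable (Spec_get_diamond_path r c m1 m2 m3 m4 out) := by unfold Spec_get_diamond_path; infer_instance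

-- ===== CLAIM (what is proved, stated in full; the proofs are below) =====
def Claim_equal_get_diamond_path : Prop := ∀ (r : Int) (c : Int) (m1 : Int) (m2 : Int) (m3 : Int) (m4 : Int), Dom_get_diamond_path r c m1 m2 m3 m4 → Spec_get_diamond_path r c m1 m2 m3 m4 (get_diamond_path r c m1 m2 m3 m4)

-- ===== LEMMAS AND PROOFS =====

theorem pvSegA_eq (dx dy : Int) (n : Nat) : ∀ (x y : Int),
    pvSegA x y dx dy n =
      ((List.range n).map (fun (i : Nat) => (x + dx * (i : Int), y + dy * (i : Int))),
       x + dx * n, y + dy * n) := by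
  induction n with
  | zero => intro x y; simp [pvSegA]
  | succ k ih =>
    intro x y
    simp only [pvSegA, ih, Prod.mk.injEq]
    refine ⟨?_, by push_cast; ring, by push_cast; ring⟩
    rw [List.range_succ_eq_map, List.map_cons, List.map_map]
    simp only [Nat.cast_zero, mul_zero, add_zero, List.cons.injEq]
    refine ⟨trivial, ?_⟩
    apply List.map_congr_left
    intro i _
    simp only [Function.comp_apply, Prod.mk.injEq]
    push_cast
    constructor <;> ring

theorem pv_toNat_cast (m : Int) : ((m.toNat : Int)) = max m 0 := by omega

theorem pv_toNat_max (m : Int) : (max m 0).toNat = m.toNat := by omega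

theorem get_diamond_path_eq (r c m1 m2 m3 m4 : Int) :
    get_diamond_path r c m1 m2 m3 m4 = get_diamond_path_alt r c m1 m2 m3 m4 := by
  simp only [get_diamond_path, get_diamond_path_alt, pvSegB, pvSegA_eq, pv_toNat_cast,
    pv_toNat_max]
  refine congrArg₂ _ (congrArg₂ _ (congrArg₂ _ ?_ ?_) ?_) ?_
  · rfl
  · exact List.map_congr_left (fun i _ => by simp only [Prod.mk.injEq]; constructor <;> ring)
  · exact List.map_congr_left (fun i _ => by simp only [Prod.mk.injEq]; constructor <;> ring)
  · exact List.map_congr_left (fun i _ => by simp only [Prod.mk.injEq]; constructor <;> ring)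

-- ===== VERDICT (by name: the statement is the Claim_ definition above) =====
theorem get_diamond_path_spec : Claim_equal_get_diamond_path := by
  intro r c m1 m2 m3 m4 _
  unfold Spec_get_diamond_path
  exact get_diamond_path_eq r c m1 m2 m3 m4
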